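-- pv_equiv track=rewrite | github.com/kaestro/algorithms_v2 | categorized/queue/muzis mukbang.py | solution
-- ===== SOURCE A (Python) =====
-- def solution(food_times, k):
--     answer = 0
--     foodLen = len(food_times)
--     totalFood = sum(food_times)
--     foodIdx = 0
--     queue = [[i, food_time] for i, food_time in  enumerate(food_times)]
--     for _ in range(k):
--         queue[foodIdx][1] -= 1
--         totalFood -= 1
--         if totalFood == 0:
--             return -1
--         if queue[foodIdx][1] == 0:
--             queue.pop(foodIdx)
--             foodLen -= 1
--         else:
--             foodIdx += 1
--         foodIdx %= foodLen
--
--     return queue[foodIdx][0] + 1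
-- ===== SOURCE B (Python) =====
-- def solution(food_times, k):
--     # Round-robin eating: the rotation visits each remaining food in turn, one
--     # unit of remaining time per visit; a food leaves the rotation on the visit
--     # that uses its time up (so only a food with positive time ever leaves),
--     # and the broadcast ends (-1) when the total remaining time, if positive,
--     # runs out within the k seconds.  Instead of simulating spoonful by
--     # spoonful, consume whole blocks: eating every survivor down to the next
--     # finishing time t costs (t - done) * alive spoonfuls at once.
--     total = sum(food_times)
--     if 0 < total <= k:
--         return -1
--     order = sorted(t for t in food_times if t > 0)
--     alive = len(food_times)
--     done = 0          # time every surviving food has absorbed so far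
--     for t in order:
--         need = (t - done) * alive
--         if k < need:
--             break
--         k -= need
--         done = t
--         alive -= 1
--     rotation = [i for i, t in enumerate(food_times) if t <= 0 or t > done]
--     return rotation[k % len(rotation)] + 1
-- ===== Notes on version B (the rewrite author's own statement) =====
-- stated objective: alternative
-- what changed: A simulates every one of the k spoonfuls on a rotating queue; B computes the same answer without per-spoonful work: it sorts the positive eating times once and consumes whole eat-every-survivor-down-to-the-next-finishing-time blocks in bulk, then indexes the surviving foods at k mod remaining; Pre_ restricts to the task's natural domain (nonempty menu, k >= 0): A raises IndexError on an empty menu, and on k < 0 A's constant answer 1 is an artifact of range(k) being empty.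
-- outside the precondition, e.g. on solution([1, 2], -1): A returns 1, B returns 2
import Mathlib
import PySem

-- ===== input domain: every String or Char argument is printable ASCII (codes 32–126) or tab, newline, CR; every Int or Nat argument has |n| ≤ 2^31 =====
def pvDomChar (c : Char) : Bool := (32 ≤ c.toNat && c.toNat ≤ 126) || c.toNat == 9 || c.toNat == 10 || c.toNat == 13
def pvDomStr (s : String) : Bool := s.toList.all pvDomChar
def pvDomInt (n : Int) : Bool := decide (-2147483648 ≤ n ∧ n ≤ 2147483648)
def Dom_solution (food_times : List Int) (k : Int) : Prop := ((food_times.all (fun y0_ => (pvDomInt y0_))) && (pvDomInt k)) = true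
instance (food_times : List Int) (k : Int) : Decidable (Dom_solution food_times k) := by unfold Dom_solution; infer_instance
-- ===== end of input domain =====

-- B replaces A's one-spoonful-at-a-time rotation with sort + whole-block bulk consumption:
-- objective 'alternative' (a different algorithm whose loop count does not depend on k).

-- ===== PORT A =====
-- A's loop: queue of [index, time] pairs; each iteration eats one spoonful at foodIdx,
-- pops emptied foods, advances foodIdx modulo the remaining length. Fuel = k iterations.
def solutionGo : Nat → List (Int × Int) → Int → Int → Int → Int
  | 0, queue, foodIdx, _, _ =>
      -- return queue[foodIdx][0] + 1
      (((PySem.List.pyGet? queue foodIdx).map Prod.fst).getD 0) + 1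
  | fuel+1, queue, foodIdx, foodLen, totalFood =>
      match PySem.List.pyIdx? queue.length foodIdx with
      | none => 0          -- IndexError (unreachable under Pre_solution)
      | some j =>
        let x := queue.getD j (0, 0)
        let queue' := queue.set j (x.1, x.2 - 1)     -- queue[foodIdx][1] -= 1
        let totalFood' := totalFood - 1
        if totalFood' = 0 then -1
        else if x.2 - 1 = 0 then
          match PySem.List.pop? queue' foodIdx with
          | none => 0      -- unreachable: index was valid
          | some (_, q2) =>
            match PySem.Int.mod? foodIdx (foodLen - 1) with
            | none => 0    -- ZeroDivisionError (unreachable under Pre_solution)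
            | some p => solutionGo fuel q2 p (foodLen - 1) totalFood'
        else
          match PySem.Int.mod? (foodIdx + 1) foodLen with
          | none => 0      -- ZeroDivisionError (unreachable under Pre_solution)
          | some p => solutionGo fuel queue' p foodLen totalFood'

def solution (food_times : List Int) (k : Int) : Int :=
  let foodLen : Int := food_times.length
  let totalFood := food_times.sum
  let queue := PySem.List.enumerate food_times
  solutionGo k.toNat queue 0 foodLen totalFood

-- ===== PORT B =====
-- for t in order: eat every survivor down to the next finishing time t in one block of
-- (t - done) * alive spoonfuls, or break when k no longer covers the block.
def altGo : List Int → Int → Int → Int → Int × Int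
  | [], _, done, k => (done, k)
  | t :: rest, alive, done, k =>
      if k < (t - done) * alive then (done, k)
      else altGo rest (alive - 1) t (k - (t - done) * alive)

def solution_alt (food_times : List Int) (k : Int) : Int :=
  if 0 < food_times.sum ∧ food_times.sum ≤ k then -1
  else
    match altGo (PySem.List.sorted (food_times.filter (fun t => decide (0 < t))) (fun t => t))
        (food_times.length : Int) 0 k with
    | (done, k') =>
      let rotation := ((PySem.List.enumerate food_times).filter
          (fun p => decide (p.2 ≤ 0 ∨ done < p.2))).map Prod.fst
      (PySem.List.pyGet? rotation (PySem.Int.mod k' (rotation.length : Int))).getD 0 + 1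

-- ===== PRECONDITION & SPEC =====
-- Pre_ restricts to the task's natural domain: a nonempty menu (A raises IndexError on [])
-- and a nonnegative spoon count (on k < 0 A's constant answer 1 is an artifact of range(k)
-- being empty).
def Pre_solution (food_times : List Int) (k : Int) : Prop :=
  food_times ≠ [] ∧ 0 ≤ k
instance (food_times : List Int) (k : Int) : Decidable (Pre_solution food_times k) := by
  unfold Pre_solution; infer_instance

def pvWitness_solution : List Int × Int := ([3, 1, 2], 5)

def Spec_solution (food_times : List Int) (k : Int) (out : Int) : Prop := out = solution_alt food_times k
instance (food_times : List Int) (k : Int) (out : Int) : Decidable (Spec_solution food_times k out) := by unfold Spec_solution; infer_instance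

-- ===== CLAIM (what is proved, stated in full; the proofs are below) =====
def Claim_equal_solution : Prop := ∀ (food_times : List Int) (k : Int), Dom_solution food_times k → Pre_solution food_times k → Spec_solution food_times k (solution food_times k)

-- ===== LEMMAS AND PROOFS =====

-- Abstract model of A's loop: the queue rotated so the current food is first; one step eats
-- the head, dropping it when its time hits 0, otherwise sending it to the back.
def runQ : Nat → List (Int × Int) → List (Int × Int)
  | 0, q => q
  | _+1, [] => []
  | n+1, (i, t) :: rest => runQ n (if t = 1 then rest else rest ++ [(i, t - 1)])

def sumT (q : List (Int × Int)) : Int := (q.map Prod.snd).sum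

theorem runQ_nil (n : Nat) : runQ n [] = [] := by
  cases n <;> rfl

theorem runQ_add (m n : Nat) (q : List (Int × Int)) :
    runQ (m + n) q = runQ n (runQ m q) := by
  induction m generalizing q with
  | zero => simp [runQ]
  | succ m ih =>
    cases q with
    | nil => simp [runQ_nil, runQ]
    | cons hd tl =>
      obtain ⟨i, t⟩ := hd
      have h : m + 1 + n = (m + n) + 1 := by omega
      rw [h]
      simp only [runQ]
      exact ih _

theorem runQ_partial : ∀ (r : Nat) (q acc : List (Int × Int)), r ≤ q.length →
    runQ r (q ++ acc) =
      q.drop r ++ acc ++ ((q.take r).filter (fun x => x.2 != 1)).map (fun x => (x.1, x.2 - 1)) := by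
  intro r
  induction r with
  | zero => intro q acc _; simp [runQ]
  | succ r ih =>
    intro q acc hle
    cases q with
    | nil => simp at hle
    | cons hd tl =>
      obtain ⟨i, t⟩ := hd
      have hle' : r ≤ tl.length := by simp at hle; omega
      simp only [List.cons_append, runQ]
      by_cases ht : t = 1
      · subst ht
        rw [if_pos rfl, ih tl acc hle']
        simp
      · rw [if_neg ht, List.append_assoc, ih tl (acc ++ [(i, t - 1)]) hle']
        have hne : (t != 1) = true := by simpa using ht
        simp [hne, List.append_assoc]

theorem runQ_chunk (q acc : List (Int × Int)) :
    runQ q.length (q ++ acc) =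
      acc ++ (q.filter (fun x => x.2 != 1)).map (fun x => (x.1, x.2 - 1)) := by
  have := runQ_partial q.length q acc (le_refl _)
  simpa using this

theorem runQ_rounds : ∀ (d : Nat) (q : List (Int × Int)), (∀ x ∈ q, x.2 ≤ 0 ∨ (d : Int) + 1 ≤ x.2) →
    runQ (d * q.length) q = q.map (fun x => (x.1, x.2 - (d : Int))) := by
  intro d
  induction d with
  | zero =>
    intro q _
    simp [runQ]
  | succ d ih =>
    intro q hq
    have hstep : (d + 1) * q.length = q.length + d * q.length := by ring
    rw [hstep, runQ_add]
    have hchunk : runQ q.length q = q.map (fun x => (x.1, x.2 - 1)) := by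
      have h2 := runQ_chunk q []
      simp only [List.append_nil] at h2
      rw [h2]
      have hf : q.filter (fun x => x.2 != 1) = q := by
        apply List.filter_eq_self.2
        intro x hx
        have := hq x hx
        have hne : x.2 ≠ 1 := by push_cast at this; omega
        simpa using hne
      simp [hf]
    rw [hchunk]
    have hlen : (q.map (fun x => (x.1, x.2 - 1))).length = q.length := by simp
    rw [← hlen]
    rw [ih _ (by
      intro y hy
      simp only [List.mem_map] at hy
      obtain ⟨x, hx, rfl⟩ := hy
      have := hq x hx
      push_cast at this ⊢
      omega)]
    simp only [List.map_map]
    apply List.map_congr_left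
    intro x _
    simp only [Function.comp]
    refine Prod.ext rfl ?_
    push_cast
    ring

theorem sumT_append (a b : List (Int × Int)) : sumT (a ++ b) = sumT a + sumT b := by
  simp [sumT]

theorem sumT_cons (a : Int × Int) (l : List (Int × Int)) : sumT (a :: l) = a.2 + sumT l := by
  simp [sumT]

-- ===== A-side: the loop equals the rotated model =====
theorem mod?_of_pos (a b : Int) (hb : 0 < b) : PySem.Int.mod? a b = some (a % b) := by
  simp only [PySem.Int.mod?]
  rw [if_neg (by omega), Int.fmod_eq_emod, if_pos (Or.inl (le_of_lt hb))]
  simp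

theorem bridgeAux : ∀ (n : Nat) (l1 l2 : List (Int × Int)) (x : Int × Int),
    solutionGo n (l1 ++ x :: l2) (l1.length : Int) ((l1 ++ x :: l2).length : Int) (sumT (l1 ++ x :: l2)) =
      (if 1 ≤ sumT (l1 ++ x :: l2) ∧ sumT (l1 ++ x :: l2) ≤ (n : Int) then -1
       else (((runQ n (x :: (l2 ++ l1))).head?.map Prod.fst).getD 0) + 1) := by
  intro n
  induction n with
  | zero =>
    intro l1 l2 x
    rw [if_neg (by
      rintro ⟨h1, h2⟩
      push_cast at h2
      omega)]
    simp only [solutionGo, PySem.List.pyGet?_append_length]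
    simp [runQ]
  | succ n ih =>
    intro l1 l2 x
    have hidx : PySem.List.pyIdx? (l1 ++ x :: l2).length ((l1.length : Nat) : Int) = some l1.length := by
      simp [PySem.List.pyIdx?]; try omega
    have hget : (l1 ++ x :: l2).getD l1.length (0, 0) = x := by
      simp [List.getD_eq_getElem?_getD]
    have hset : (l1 ++ x :: l2).set l1.length (x.1, x.2 - 1) = l1 ++ (x.1, x.2 - 1) :: l2 := by
      rw [List.set_append]; simp
    have hsum : sumT (l1 ++ x :: l2) = sumT l1 + x.2 + sumT l2 := by
      rw [sumT_append, sumT_cons]; ring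
    simp only [solutionGo, hidx, hget, hset]
    by_cases hz : sumT (l1 ++ x :: l2) - 1 = 0
    · rw [if_pos hz, if_pos ⟨by omega, by
        push_cast
        have hn : (0 : Int) ≤ (n : Int) := Int.natCast_nonneg n
        omega⟩]
    · rw [if_neg hz]
      by_cases hx2 : x.2 - 1 = 0
      · -- pop branch: the current food is finished
        rw [if_pos hx2]
        have hx2' : x.2 = 1 := by omega
        have hplt : l1.length < (l1 ++ (x.1, x.2 - 1) :: l2).length := by simp
        have hpop : PySem.List.pop? (l1 ++ (x.1, x.2 - 1) :: l2) ((l1.length : Nat) : Int)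
            = some ((x.1, x.2 - 1), l1 ++ l2) := by
          rw [PySem.List.pop?_natCast _ _ hplt]
          congr 1
          refine Prod.ext ?_ ?_
          · simp [List.getElem_append_right]
          · show (l1 ++ (x.1, x.2 - 1) :: l2).eraseIdx l1.length = l1 ++ l2
            rw [List.eraseIdx_append_of_length_le (le_refl _)]
            simp
        have hne : l1 ++ l2 ≠ [] := by
          intro hcontra
          apply hz
          have hl := sumT_append l1 l2
          rw [hcontra, show sumT ([] : List (Int × Int)) = 0 from rfl] at hl
          rw [hsum, hx2']
          linarith
        have hsumn : sumT (l1 ++ l2) = sumT (l1 ++ x :: l2) - 1 := by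
          rw [sumT_append, hsum, hx2']; ring
        cases hl2 : l2 with
        | cons c l2t =>
          subst hl2
          have hmod : PySem.Int.mod? ((l1.length : Nat) : Int) (((l1 ++ x :: c :: l2t).length : Int) - 1)
              = some ((l1.length : Nat) : Int) := by
            rw [mod?_of_pos _ _ (by simp; omega)]
            congr 1
            exact Int.emod_eq_of_lt (by positivity) (by simp; omega)
          simp only [hpop, hmod]
          have hlenrw : ((l1 ++ x :: c :: l2t).length : Int) - 1 = ((l1 ++ c :: l2t).length : Int) := by
            simp; omega
          rw [hlenrw, ← hsumn, ih l1 l2t c]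
          have hcond : (1 ≤ sumT (l1 ++ c :: l2t) ∧ sumT (l1 ++ c :: l2t) ≤ (n : Int)) ↔ (1 ≤ sumT (l1 ++ x :: c :: l2t) ∧ sumT (l1 ++ x :: c :: l2t) ≤ ((n + 1 : Nat) : Int)) := by
            rw [show sumT (l1 ++ c :: l2t) = sumT (l1 ++ x :: c :: l2t) - 1 from hsumn]
            push_cast
            omega
          have hrun : runQ (n + 1) (x :: ((c :: l2t) ++ l1)) = runQ n (c :: (l2t ++ l1)) := by
            obtain ⟨x1, x2⟩ := x
            simp only [runQ]
            simp only at hx2'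
            rw [if_pos hx2']
            simp
          rw [hrun]
          split_ifs with h1 h2 h3 <;>
            first
              | rfl
              | exact absurd (hcond.mp h1) h2
              | exact absurd (hcond.mpr h3) h1
        | nil =>
          subst hl2
          simp only [List.append_nil] at hne hsumn
          cases hl1 : l1 with
          | nil => simp [hl1] at hne
          | cons c l1t =>
            subst hl1
            have hmod : PySem.Int.mod? (((c :: l1t).length : Nat) : Int) ((((c :: l1t) ++ x :: ([] : List (Int × Int))).length : Int) - 1)
                = some ((0 : Nat) : Int) := by
              rw [mod?_of_pos _ _ (by simp)]
              rw [show ((((c :: l1t) ++ x :: ([] : List (Int × Int))).length : Int) - 1) = (((c :: l1t).length : Nat) : Int) by simp]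
              simp
            simp only [hpop, hmod]
            simp only [List.append_nil]
            have hlenrw : (((c :: l1t) ++ x :: ([] : List (Int × Int))).length : Int) - 1 = (((c :: l1t).length : Nat) : Int) := by
              simp
            rw [hlenrw, ← hsumn]
            have hih := ih [] l1t c
            simp only [List.nil_append, List.length_nil, Nat.cast_zero] at hih
            try rw [show ((0 : Nat) : Int) = (0 : Int) by simp]
            rw [hih]
            have hcond : (1 ≤ sumT (c :: l1t) ∧ sumT (c :: l1t) ≤ (n : Int)) ↔ (1 ≤ sumT ((c :: l1t) ++ x :: []) ∧ sumT ((c :: l1t) ++ x :: []) ≤ ((n + 1 : Nat) : Int)) := by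
              rw [show sumT (c :: l1t) = sumT ((c :: l1t) ++ x :: []) - 1 from hsumn]
              push_cast
              omega
            have hrun : runQ (n + 1) (x :: (([] : List (Int × Int)) ++ c :: l1t)) = runQ n (c :: (l1t ++ [])) := by
              obtain ⟨x1, x2⟩ := x
              simp only [runQ]
              simp only at hx2'
              rw [if_pos hx2']
              simp
            rw [hrun]
            split_ifs with h1 h2 h3 <;>
              first
                | rfl
                | exact absurd (hcond.mp h1) h2
                | exact absurd (hcond.mpr h3) h1
      · -- continue branch: the current food is not finished; advance foodIdx
        rw [if_neg hx2]
        have hsumn : sumT (l1 ++ (x.1, x.2 - 1) :: l2) = sumT (l1 ++ x :: l2) - 1 := by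
          rw [sumT_append, sumT_cons, hsum]
          simp [sumT]
          ring
        cases hl2 : l2 with
        | cons c l2t =>
          subst hl2
          have hmod : PySem.Int.mod? (((l1.length : Nat) : Int) + 1) ((l1 ++ x :: c :: l2t).length : Int)
              = some (((l1 ++ [(x.1, x.2 - 1)]).length : Nat) : Int) := by
            rw [mod?_of_pos _ _ (by simp; omega)]
            rw [Int.emod_eq_of_lt (by positivity) (by simp)]
            simp
          simp only [hmod]
          have hdecomp : l1 ++ (x.1, x.2 - 1) :: c :: l2t = (l1 ++ [(x.1, x.2 - 1)]) ++ c :: l2t := by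
            simp
          rw [hdecomp]
          have hlenrw : ((l1 ++ x :: c :: l2t).length : Int) = (((l1 ++ [(x.1, x.2 - 1)]) ++ c :: l2t).length : Int) := by
            simp
          have hsumrw : sumT (l1 ++ x :: c :: l2t) - 1 = sumT ((l1 ++ [(x.1, x.2 - 1)]) ++ c :: l2t) := by
            rw [← hdecomp, hsumn]
          rw [hlenrw, hsumrw, ih (l1 ++ [(x.1, x.2 - 1)]) l2t c]
          have hcond : (1 ≤ sumT ((l1 ++ [(x.1, x.2 - 1)]) ++ c :: l2t) ∧ sumT ((l1 ++ [(x.1, x.2 - 1)]) ++ c :: l2t) ≤ (n : Int)) ↔ (1 ≤ sumT (l1 ++ x :: c :: l2t) ∧ sumT (l1 ++ x :: c :: l2t) ≤ ((n + 1 : Nat) : Int)) := by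
            rw [← hsumrw]
            push_cast
            omega
          have hrun : runQ (n + 1) (x :: ((c :: l2t) ++ l1)) = runQ n (c :: (l2t ++ (l1 ++ [(x.1, x.2 - 1)]))) := by
            obtain ⟨x1, x2⟩ := x
            simp only [runQ]
            simp only at hx2
            rw [if_neg (fun h => hx2 (by simp [h]))]
            simp
          rw [hrun]
          split_ifs with h1 h2 h3 <;>
            first
              | rfl
              | exact absurd (hcond.mp h1) h2
              | exact absurd (hcond.mpr h3) h1
        | nil =>
          subst hl2
          have hmod : PySem.Int.mod? (((l1.length : Nat) : Int) + 1) ((l1 ++ x :: ([] : List (Int × Int))).length : Int)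
              = some ((0 : Nat) : Int) := by
            rw [mod?_of_pos _ _ (by simp)]
            rw [show ((l1.length : Nat) : Int) + 1 = ((l1 ++ x :: ([] : List (Int × Int))).length : Int) by simp]
            simp
          simp only [hmod]
          cases hl1 : l1 with
          | nil =>
            subst hl1
            have hih := ih [] [] (x.1, x.2 - 1)
            simp only [List.nil_append, List.length_nil, Nat.cast_zero] at hih ⊢
            rw [show sumT ([x]) - 1 = sumT [(x.1, x.2 - 1)] by simp [sumT]]
            rw [show (([x] : List (Int × Int)).length : Int) = ((([(x.1, x.2 - 1)] : List (Int × Int)).length : Nat) : Int) by simp]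
            rw [hih]
            have hcond : (1 ≤ sumT [(x.1, x.2 - 1)] ∧ sumT [(x.1, x.2 - 1)] ≤ (n : Int)) ↔ (1 ≤ sumT [x] ∧ sumT [x] ≤ ((n + 1 : Nat) : Int)) := by
              have e1 : sumT [(x.1, x.2 - 1)] = x.2 - 1 := by simp [sumT]
              have e2 : sumT [x] = x.2 := by simp [sumT]
              rw [e1, e2]
              push_cast
              omega
            have hrun : runQ (n + 1) [x] = runQ n [(x.1, x.2 - 1)] := by
              obtain ⟨x1, x2⟩ := x
              simp only [runQ]
              simp only at hx2
              rw [if_neg (fun h => hx2 (by simp [h]))]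
              simp
            rw [hrun]
            split_ifs with h1 h2 h3 <;>
              first
                | rfl
                | exact absurd (hcond.mp h1) h2
                | exact absurd (hcond.mpr h3) h1
          | cons c l1t =>
            subst hl1
            have hdecomp : (c :: l1t) ++ (x.1, x.2 - 1) :: ([] : List (Int × Int)) = ([] : List (Int × Int)) ++ c :: (l1t ++ [(x.1, x.2 - 1)]) := by
              simp
            rw [hdecomp]
            have hih := ih [] (l1t ++ [(x.1, x.2 - 1)]) c
            simp only [List.nil_append, List.length_nil, Nat.cast_zero] at hih
            have hlenrw : (((c :: l1t) ++ x :: ([] : List (Int × Int))).length : Int) = ((c :: (l1t ++ [(x.1, x.2 - 1)])).length : Int) := by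
              simp
            have hsumrw : sumT ((c :: l1t) ++ x :: ([] : List (Int × Int))) - 1 = sumT (c :: (l1t ++ [(x.1, x.2 - 1)])) := by
              simp [sumT]; ring
            rw [hlenrw, hsumrw]
            simp only [List.nil_append]
            try rw [show ((0 : Nat) : Int) = (0 : Int) by simp]
            rw [hih]
            have hcond : (1 ≤ sumT (c :: (l1t ++ [(x.1, x.2 - 1)])) ∧ sumT (c :: (l1t ++ [(x.1, x.2 - 1)])) ≤ (n : Int)) ↔ (1 ≤ sumT ((c :: l1t) ++ x :: []) ∧ sumT ((c :: l1t) ++ x :: []) ≤ ((n + 1 : Nat) : Int)) := by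
              rw [← hsumrw]
              push_cast
              omega
            have hrun : runQ (n + 1) (x :: c :: l1t) = runQ n (c :: (l1t ++ [(x.1, x.2 - 1)] ++ [])) := by
              obtain ⟨x1, x2⟩ := x
              simp only [runQ]
              simp only at hx2
              rw [if_neg (fun h => hx2 (by simp [h]))]
              simp
            rw [hrun]
            split_ifs with h1 h2 h3 <;>
              first
                | rfl
                | exact absurd (hcond.mp h1) h2
                | exact absurd (hcond.mpr h3) h1

theorem enum_snd : ∀ (xs : List Int) (s : Int), (PySem.List.enumerate xs s).map Prod.snd = xs := by
  intro xs
  induction xs with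
  | nil => intro s; simp [PySem.List.enumerate_nil]
  | cons a l ih => intro s; rw [PySem.List.enumerate_cons]; simp [ih]

-- A under Pre_ equals the rotated model's closed form
theorem solution_closed (food_times : List Int) (k : Int) (hne : food_times ≠ []) :
    solution food_times k =
      (if 1 ≤ food_times.sum ∧ food_times.sum ≤ k then -1
       else (((runQ k.toNat (PySem.List.enumerate food_times)).head?.map Prod.fst).getD 0) + 1) := by
  have hsnd : (PySem.List.enumerate food_times).map Prod.snd = food_times := enum_snd food_times 0
  have hlenq : (PySem.List.enumerate food_times).length = food_times.length := by
    conv_rhs => rw [← hsnd]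
    simp
  have hsumq : sumT (PySem.List.enumerate food_times) = food_times.sum := by
    rw [sumT, hsnd]
  cases hq : PySem.List.enumerate food_times with
  | nil =>
    exfalso
    apply hne
    rw [← hsnd, hq]
    simp
  | cons x l2 =>
    have hb := bridgeAux k.toNat [] l2 x
    simp only [List.nil_append, List.length_nil, Nat.cast_zero, List.append_nil] at hb
    show solutionGo k.toNat (PySem.List.enumerate food_times) 0 (food_times.length : Int) food_times.sum = _
    rw [show ((food_times.length : Nat) : Int) = (((x :: l2).length : Nat) : Int) by rw [← hlenq, hq],
      show food_times.sum = sumT (x :: l2) by rw [← hsumq, hq], hq, hb,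
      show sumT (x :: l2) = food_times.sum by rw [← hsumq, hq]]
    have hcond : (1 ≤ food_times.sum ∧ food_times.sum ≤ ((k.toNat : Nat) : Int))
        ↔ (1 ≤ food_times.sum ∧ food_times.sum ≤ k) := by omega
    split_ifs with h1 h2 h3 <;>
      first
        | rfl
        | exact absurd (hcond.mp h1) h2
        | exact absurd (hcond.mpr h3) h1

-- ===== B-side: the bulk loop invariant =====
theorem altGo_inv : ∀ (s pre : List Int) (stuck base kr : Int) (qpos : List Int),
    (pre ++ s).Perm qpos →
    (∀ x ∈ pre, x ≤ base) →
    (∀ x ∈ s, base ≤ x) →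
    s.Pairwise (fun a b => a ≤ b) →
    0 ≤ stuck → 0 ≤ base → 0 ≤ kr →
    ∃ s' pre' base' kr',
      altGo s (stuck + (s.length : Int)) base kr = (base', kr') ∧
      (pre' ++ s').Perm qpos ∧
      (∀ x ∈ pre', x ≤ base') ∧
      (∀ x ∈ s', base' < x) ∧
      s'.Pairwise (fun a b => a ≤ b) ∧
      0 ≤ base' ∧ 0 ≤ kr' ∧
      (pre'.sum + base' * (stuck + (s'.length : Int)) + kr' =
        pre.sum + base * (stuck + (s.length : Int)) + kr) ∧
      (∀ t rest', s' = t :: rest' → kr' < (t - base') * (stuck + (rest'.length : Int) + 1)) := by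
  intro s
  induction s with
  | nil =>
    intro pre stuck base kr qpos hperm hpre hs hpw hst0 hb0 hk0
    exact ⟨[], pre, base, kr, rfl, by simpa using hperm, hpre, by simp, List.Pairwise.nil, hb0, hk0,
      by simp, fun t rest' h => by simp at h⟩
  | cons t rest ih =>
    intro pre stuck base kr qpos hperm hpre hs hpw hst0 hb0 hk0
    have hbt : base ≤ t := hs t (by simp)
    have hcast : stuck + ((t :: rest).length : Int) = stuck + (rest.length : Int) + 1 := by
      push_cast [List.length_cons]; ring
    by_cases hlt : kr < (t - base) * (stuck + (rest.length : Int) + 1)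
    · refine ⟨t :: rest, pre, base, kr, ?_, hperm, hpre, ?_, hpw, hb0, hk0, rfl, ?_⟩
      · simp only [altGo]
        rw [if_pos (by rw [hcast]; exact hlt)]
      · have htb : 0 < t - base := by
          by_contra hc
          rw [not_lt] at hc
          have hL : (0 : Int) < stuck + (rest.length : Int) + 1 := by
            have := Int.natCast_nonneg rest.length
            omega
          nlinarith
        intro x hx
        have hbt' : base < t := by linarith
        rcases List.mem_cons.1 hx with h | h
        · rw [h]; exact hbt'
        · have hx2 := (List.pairwise_cons.1 hpw).1 x h
          linarith
      · intro t' rest' heq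
        cases heq
        exact hlt
    · have hstep : altGo (t :: rest) (stuck + ((t :: rest).length : Int)) base kr
          = altGo rest (stuck + (rest.length : Int)) t (kr - (t - base) * (stuck + (rest.length : Int) + 1)) := by
        simp only [altGo]
        rw [if_neg (by rw [hcast]; exact hlt), hcast]
        congr 1 <;> ring
      have hperm' : ((pre ++ [t]) ++ rest).Perm qpos := by
        simpa using hperm
      have hpre' : ∀ x ∈ pre ++ [t], x ≤ t := by
        intro x hx
        rcases List.mem_append.1 hx with h | h
        · exact le_trans (hpre x h) hbt
        · simp at h; rw [h]
      have hs' : ∀ x ∈ rest, t ≤ x := by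
        intro x hx
        exact (List.pairwise_cons.1 hpw).1 x hx
      obtain ⟨s', pre', base', kr', heval, hperm2, hpre2, hs2, hpw2, hb2, hk2, hsum2, hexit2⟩ :=
        ih (pre ++ [t]) stuck t (kr - (t - base) * (stuck + (rest.length : Int) + 1)) qpos
          hperm' hpre' hs' (List.pairwise_cons.1 hpw).2 hst0 (le_trans hb0 hbt) (by linarith)
      refine ⟨s', pre', base', kr', by rw [hstep]; exact heval, hperm2, hpre2, hs2, hpw2, hb2, hk2, ?_, hexit2⟩
      rw [hsum2]
      simp only [List.sum_append, List.sum_cons, List.sum_nil, List.length_cons]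
      push_cast
      ring

-- steps consumed by the first b complete rounds: a food with time t ≤ 0 is visited every
-- round forever; a food with time t ≥ 1 is visited min(t,b) times
def consumedTo (q0 : List (Int × Int)) (b : Int) : Int :=
  (q0.map (fun x => if x.2 ≤ 0 then b else min x.2 b)).sum

theorem consumedTo_succ (q0 : List (Int × Int)) (b : Int) :
    consumedTo q0 (b + 1) = consumedTo q0 b + (q0.filter (fun x => decide (x.2 ≤ 0 ∨ b < x.2))).length := by
  induction q0 with
  | nil => simp [consumedTo]
  | cons a l ih =>
    simp only [consumedTo, List.map_cons, List.sum_cons] at ih ⊢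
    rw [List.filter_cons]
    by_cases h : a.2 ≤ 0 ∨ b < a.2
    · simp only [h, decide_true, if_true, List.length_cons]
      rw [ih]
      push_cast
      split_ifs <;> omega
    · simp only [h, decide_false, Bool.false_eq_true, if_false]
      rw [ih]
      split_ifs <;> omega

theorem phase : ∀ (b : Nat) (q0 : List (Int × Int)),
    runQ (consumedTo q0 b).toNat q0 =
      (q0.filter (fun x => decide (x.2 ≤ 0 ∨ (b : Int) < x.2))).map (fun x => (x.1, x.2 - (b : Int))) := by
  intro b
  induction b with
  | zero =>
    intro q0
    have hmap : q0.map (fun x => if x.2 ≤ 0 then ((0 : Nat) : Int) else min x.2 ((0 : Nat) : Int))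
        = q0.map (fun _ => (0 : Int)) :=
      List.map_congr_left (fun x _ => by split_ifs <;> omega)
    have hc : consumedTo q0 ((0 : Nat) : Int) = 0 := by
      rw [consumedTo, hmap, PySem.List.sum_map_const_int]
      ring
    rw [hc]
    have hfil : q0.filter (fun x => decide (x.2 ≤ 0 ∨ ((0 : Nat) : Int) < x.2)) = q0 :=
      List.filter_eq_self.2 (fun x _ => by simp; omega)
    rw [hfil]
    simp [runQ]
  | succ b ih =>
    intro q0
    have hc0 : 0 ≤ consumedTo q0 b := by
      apply List.sum_nonneg
      intro y hy
      simp only [List.mem_map] at hy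
      obtain ⟨x, hx, rfl⟩ := hy
      split_ifs <;> omega
    push_cast
    rw [consumedTo_succ]
    have htn : (consumedTo q0 b + ((q0.filter (fun x => decide (x.2 ≤ 0 ∨ (b : Int) < x.2))).length : Int)).toNat
        = (consumedTo q0 b).toNat + (q0.filter (fun x => decide (x.2 ≤ 0 ∨ (b : Int) < x.2))).length := by
      omega
    rw [htn, runQ_add, ih q0]
    have hlen : (q0.filter (fun x => decide (x.2 ≤ 0 ∨ (b : Int) < x.2))).length
        = ((q0.filter (fun x => decide (x.2 ≤ 0 ∨ (b : Int) < x.2))).map (fun x => (x.1, x.2 - (b : Int)))).length := by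
      simp
    have hchunk := runQ_chunk ((q0.filter (fun x => decide (x.2 ≤ 0 ∨ (b : Int) < x.2))).map (fun x => (x.1, x.2 - (b : Int)))) []
    simp only [List.append_nil, List.nil_append] at hchunk
    rw [hlen, hchunk]
    rw [List.filter_map]
    rw [List.map_map]
    rw [List.filter_filter]
    rw [List.filter_congr (q := fun x => decide (x.2 ≤ 0 ∨ ((b : Int) + 1) < x.2)) (fun x _ => by
      show ((x.2 - (b : Int) != 1) && decide (x.2 ≤ 0 ∨ (b : Int) < x.2)) = decide (x.2 ≤ 0 ∨ (b : Int) + 1 < x.2)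
      rw [Bool.eq_iff_iff]
      simp only [Bool.and_eq_true, bne_iff_ne, ne_eq, decide_eq_true_eq]
      omega)]
    apply List.map_congr_left
    intro x _
    simp only [Function.comp]
    refine Prod.ext rfl ?_
    push_cast
    ring

theorem runQ_head (q : List (Int × Int)) (r : Nat) (hr : r < q.length) :
    (runQ r q).head? = some (q[r]'hr) := by
  have hp := runQ_partial r q [] (le_of_lt hr)
  simp only [List.append_nil] at hp
  rw [hp, List.head?_append, List.head?_drop, List.getElem?_eq_getElem hr]
  rfl

-- the kept foods split into the never-finished ones and the positive ones above the base
theorem remSplit : ∀ (l : List (Int × Int)) (b : Int), 0 ≤ b →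
    (l.filter (fun p => decide (p.2 ≤ 0 ∨ b < p.2))).length
      = (l.filter (fun p => decide (p.2 ≤ 0))).length
        + ((l.filter (fun p => decide (0 < p.2))).filter (fun p => decide (b < p.2))).length := by
  intro l b hb
  induction l with
  | nil => simp
  | cons a t ih =>
    by_cases h1 : a.2 ≤ 0
    · have e1 : (a :: t).filter (fun p => decide (p.2 ≤ 0 ∨ b < p.2)) = a :: t.filter (fun p => decide (p.2 ≤ 0 ∨ b < p.2)) := by
        rw [List.filter_cons, if_pos (by simp [h1])]
      have e2 : (a :: t).filter (fun p => decide (p.2 ≤ 0)) = a :: t.filter (fun p => decide (p.2 ≤ 0)) := by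
        rw [List.filter_cons, if_pos (by simp [h1])]
      have e3 : (a :: t).filter (fun p => decide (0 < p.2)) = t.filter (fun p => decide (0 < p.2)) := by
        rw [List.filter_cons, if_neg (by simp; omega)]
      rw [e1, e2, e3]
      simp only [List.length_cons]
      omega
    · have e2 : (a :: t).filter (fun p => decide (p.2 ≤ 0)) = t.filter (fun p => decide (p.2 ≤ 0)) := by
        rw [List.filter_cons, if_neg (by simp [h1])]
      have e3 : (a :: t).filter (fun p => decide (0 < p.2)) = a :: t.filter (fun p => decide (0 < p.2)) := by
        rw [List.filter_cons, if_pos (by simp; omega)]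
      by_cases h2 : b < a.2
      · have e1 : (a :: t).filter (fun p => decide (p.2 ≤ 0 ∨ b < p.2)) = a :: t.filter (fun p => decide (p.2 ≤ 0 ∨ b < p.2)) := by
          rw [List.filter_cons, if_pos (by simp [h2])]
        have e4 : (a :: t.filter (fun p => decide (0 < p.2))).filter (fun p => decide (b < p.2)) = a :: (t.filter (fun p => decide (0 < p.2))).filter (fun p => decide (b < p.2)) := by
          rw [List.filter_cons, if_pos (by simp [h2])]
        rw [e1, e2, e3, e4]
        simp only [List.length_cons]
        omega
      · have e1 : (a :: t).filter (fun p => decide (p.2 ≤ 0 ∨ b < p.2)) = t.filter (fun p => decide (p.2 ≤ 0 ∨ b < p.2)) := by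
          rw [List.filter_cons, if_neg (by simp; omega)]
        have e4 : (a :: t.filter (fun p => decide (0 < p.2))).filter (fun p => decide (b < p.2)) = (t.filter (fun p => decide (0 < p.2))).filter (fun p => decide (b < p.2)) := by
          rw [List.filter_cons, if_neg (by simp [h2])]
        rw [e1, e2, e3, e4]
        omega

theorem sum_ge_len : ∀ (l : List Int), (∀ x ∈ l, 1 ≤ x) → (l.length : Int) ≤ l.sum := by
  intro l
  induction l with
  | nil => intro _; simp
  | cons a t ih =>
    intro h
    have h1 := h a (by simp)
    have h2 := ih (fun y hy => h y (by simp [hy]))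
    simp only [List.length_cons, List.sum_cons]
    push_cast
    linarith

theorem filter_snd_map (ft : List Int) (P : Int → Bool) :
    ((PySem.List.enumerate ft).filter (fun p => P p.2)).map Prod.snd = ft.filter P := by
  conv_rhs => rw [← enum_snd ft 0]
  rw [List.filter_map]
  rfl

theorem mem_snd_of_mem_ft (ft : List Int) (t : Int) (ht : t ∈ ft) :
    ∃ p ∈ PySem.List.enumerate ft, p.2 = t := by
  have hsnd : (PySem.List.enumerate ft).map Prod.snd = ft := enum_snd ft 0
  rw [← hsnd] at ht
  obtain ⟨p, hp, hpe⟩ := List.mem_map.1 ht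
  exact ⟨p, hp, hpe⟩

-- ===== the main bridge: common setup, then the three verdicts =====
theorem main_bridge (ft : List Int) (k : Int) (hne : ft ≠ []) (hk0 : 0 ≤ k) :
    ∃ pre' s' base' k',
      solution_alt ft k =
        (if 0 < ft.sum ∧ ft.sum ≤ k then -1
         else (PySem.List.pyGet? (((PySem.List.enumerate ft).filter (fun p => decide (p.2 ≤ 0 ∨ base' < p.2))).map Prod.fst)
             (PySem.Int.mod k' ((((PySem.List.enumerate ft).filter (fun p => decide (p.2 ≤ 0 ∨ base' < p.2))).map Prod.fst).length : Int))).getD 0 + 1) ∧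
      (pre' ++ s').Perm (ft.filter (fun t => decide (0 < t))) ∧
      (∀ x ∈ pre', x ≤ base') ∧
      (∀ x ∈ s', base' < x) ∧
      s'.Pairwise (fun a b => a ≤ b) ∧
      0 ≤ base' ∧ 0 ≤ k' ∧
      (pre'.sum + base' * (((ft.filter (fun t => decide (t ≤ 0))).length : Int) + (s'.length : Int)) + k' = k) ∧
      (∀ t rest', s' = t :: rest' → k' < (t - base') * (((ft.filter (fun t => decide (t ≤ 0))).length : Int) + (rest'.length : Int) + 1)) := by
  have hSperm : (PySem.List.sorted (ft.filter (fun t => decide (0 < t))) (fun t => t)).Perm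
      (ft.filter (fun t => decide (0 < t))) := by
    simpa using PySem.List.sorted_perm (ft.filter (fun t => decide (0 < t))) (fun t => t) false
  have hlenft : (ft.length : Int) =
      ((ft.filter (fun t => decide (t ≤ 0))).length : Int)
        + ((PySem.List.sorted (ft.filter (fun t => decide (0 < t))) (fun t => t)).length : Int) := by
    have hsplit := List.filter_append_perm (fun t : Int => decide (t ≤ 0)) ft
    have hnot : ft.filter (fun t => !decide (t ≤ 0)) = ft.filter (fun t => decide (0 < t)) :=
      List.filter_congr (fun x _ => by rw [Bool.eq_iff_iff]; simp)
    rw [hnot] at hsplit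
    have hlen := hsplit.length_eq
    rw [List.length_append] at hlen
    rw [hSperm.length_eq]
    push_cast
    omega
  obtain ⟨s', pre', base', k', heval, hperm2, hpre2, hs2, hpw2, hb2, hk2, hsum2, hexit2⟩ :=
    altGo_inv (PySem.List.sorted (ft.filter (fun t => decide (0 < t))) (fun t => t)) []
      ((ft.filter (fun t => decide (t ≤ 0))).length : Int) 0 k
      (ft.filter (fun t => decide (0 < t)))
      (by simpa using hSperm) (by simp)
      (fun x hx => by
        have hx' := (PySem.List.mem_sorted _ _ _ x).1 hx
        have h2 := (List.mem_filter.1 hx').2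
        simp only [decide_eq_true_eq] at h2
        omega)
      (PySem.List.sorted_pairwise _ _) (Int.natCast_nonneg _) (le_refl 0) hk0
  refine ⟨pre', s', base', k', ?_, hperm2, hpre2, hs2, hpw2, ?_, hk2, ?_, hexit2⟩
  · unfold solution_alt
    rw [show (ft.length : Int)
        = ((ft.filter (fun t => decide (t ≤ 0))).length : Int)
          + ((PySem.List.sorted (ft.filter (fun t => decide (0 < t))) (fun t => t)).length : Int) from hlenft,
      heval]
  · exact hb2
  · simp only [List.sum_nil, zero_add, zero_mul, add_zero] at hsum2
    linarith [hsum2]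

-- from "every food is kept" being empty: the whole menu was positive and finished
theorem rot_empty_facts (ft : List Int) (k : Int) (hne : ft ≠ [])
    (pre' s' : List Int) (base' k' : Int)
    (hperm2 : (pre' ++ s').Perm (ft.filter (fun t => decide (0 < t))))
    (hpre2 : ∀ x ∈ pre', x ≤ base')
    (hs2 : ∀ x ∈ s', base' < x)
    (hk2 : 0 ≤ k')
    (hsum2 : pre'.sum + base' * (((ft.filter (fun t => decide (t ≤ 0))).length : Int) + (s'.length : Int)) + k' = k)
    (hrot : ((PySem.List.enumerate ft).filter (fun p => decide (p.2 ≤ 0 ∨ base' < p.2))).map Prod.fst = []) :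
    1 ≤ ft.sum ∧ ft.sum ≤ k := by
  have hfilnil : (PySem.List.enumerate ft).filter (fun p => decide (p.2 ≤ 0 ∨ base' < p.2)) = [] :=
    List.map_eq_nil_iff.1 hrot
  have hall : ∀ p ∈ PySem.List.enumerate ft, 1 ≤ p.2 ∧ p.2 ≤ base' := by
    intro p hp
    have := List.filter_eq_nil_iff.1 hfilnil p hp
    simp only [decide_eq_true_eq] at this
    push_neg at this
    omega
  have hallft : ∀ t ∈ ft, 1 ≤ t ∧ t ≤ base' := by
    intro t ht
    obtain ⟨p, hp, hpe⟩ := mem_snd_of_mem_ft ft t ht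
    rw [← hpe]
    exact hall p hp
  have hstuck0 : ft.filter (fun t => decide (t ≤ 0)) = [] :=
    List.filter_eq_nil_iff.2 (fun t ht => by
      have := (hallft t ht).1
      simp
      omega)
  have hs'nil : s' = [] := by
    cases hs'c : s' with
    | nil => rfl
    | cons t0 rest0 =>
      exfalso
      have ht0 : t0 ∈ pre' ++ s' := by rw [hs'c]; simp
      have ht0ft : t0 ∈ ft.filter (fun t => decide (0 < t)) := hperm2.mem_iff.1 ht0
      have ht0ft' : t0 ∈ ft := (List.mem_filter.1 ht0ft).1
      have h1 := (hallft t0 ht0ft').2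
      have h2 := hs2 t0 (by rw [hs'c]; simp)
      omega
  have hfil_self : ft.filter (fun t => decide (0 < t)) = ft :=
    List.filter_eq_self.2 (fun t ht => by
      have := (hallft t ht).1
      simp
      omega)
  have hpperm : pre'.Perm ft := by
    have := hperm2
    rw [hs'nil, List.append_nil, hfil_self] at this
    exact this
  have hsum' : pre'.sum = ft.sum := hpperm.sum_eq
  rw [hstuck0, hs'nil] at hsum2
  simp only [List.length_nil, Nat.cast_zero, add_zero, mul_zero] at hsum2
  constructor
  · have hge := sum_ge_len ft (fun x hx => (hallft x hx).1)
    have hlp : 0 < ft.length := List.length_pos_iff.2 hne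
    have : (1 : Int) ≤ (ft.length : Int) := by exact_mod_cast hlp
    linarith
  · linarith [hsum2, hsum']

-- ===== the VERDICT proofs' bodies =====
theorem equal_body (ft : List Int) (k : Int) (hne : ft ≠ []) (hk0 : 0 ≤ k) :
    solution ft k = solution_alt ft k := by
  have hsnd : (PySem.List.enumerate ft).map Prod.snd = ft := enum_snd ft 0
  obtain ⟨pre', s', base', k', halt, hperm2, hpre2, hs2, hpw2, hb2, hk2, hsum2, hexit2⟩ :=
    main_bridge ft k hne hk0
  rw [solution_closed ft k hne, halt]
  set rem := (PySem.List.enumerate ft).filter (fun p => decide (p.2 ≤ 0 ∨ base' < p.2)) with hremdef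
  by_cases hone : 1 ≤ ft.sum ∧ ft.sum ≤ k
  · rw [if_pos hone, if_pos (show 0 < ft.sum ∧ ft.sum ≤ k by omega)]
  · have hrot : ¬ rem.map Prod.fst = [] := fun h =>
      hone (rot_empty_facts ft k hne pre' s' base' k' hperm2 hpre2 hs2 hk2 hsum2 h)
    rw [if_neg hone, if_neg (show ¬(0 < ft.sum ∧ ft.sum ≤ k) by omega)]
    -- the main computation: A's rotation after k spoons = B's bulk result
    have hstuckcast : ((ft.filter (fun t => decide (t ≤ 0))).length : Int)
        = (((PySem.List.enumerate ft).filter (fun p => decide (p.2 ≤ 0))).length : Int) := by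
      have h := filter_snd_map ft (fun t => decide (t ≤ 0))
      rw [← h]
      simp
    have hpermS : s'.Perm ((ft.filter (fun t => decide (0 < t))).filter (fun t => decide (base' < t))) := by
      have h1 := hperm2.filter (fun t => decide (base' < t))
      rw [List.filter_append] at h1
      have hpn : pre'.filter (fun t => decide (base' < t)) = [] :=
        List.filter_eq_nil_iff.2 (fun a ha => by
          have := hpre2 a ha
          simp
          omega)
      have hss : s'.filter (fun t => decide (base' < t)) = s' :=
        List.filter_eq_self.2 (fun a ha => by
          have := hs2 a ha
          simpa using this)
      rw [hpn, hss] at h1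
      simpa using h1
    have hm : (rem.length : Int) = ((ft.filter (fun t => decide (t ≤ 0))).length : Int) + (s'.length : Int) := by
      rw [hremdef, remSplit _ _ hb2, hstuckcast]
      have hmapq : (((PySem.List.enumerate ft).filter (fun p => decide (0 < p.2))).filter (fun p => decide (base' < p.2))).length
          = ((ft.filter (fun t => decide (0 < t))).filter (fun t => decide (base' < t))).length := by
        rw [List.filter_filter, List.filter_filter]
        have h := filter_snd_map ft (fun t => decide (base' < t) && decide (0 < t))
        rw [← h]
        simp
      rw [hmapq, ← hpermS.length_eq]
      push_cast
      ring
    have hmpos : 0 < rem.length := by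
      rcases hremc : rem with _ | ⟨a, rt⟩
      · exfalso; apply hrot; rw [hremc]; rfl
      · simp [hremc]
    -- the steps consumed so far equal consumedTo at base'
    have hcons : pre'.sum + base' * (((ft.filter (fun t => decide (t ≤ 0))).length : Int) + (s'.length : Int))
        = consumedTo (PySem.List.enumerate ft) base' := by
      have hmapval : consumedTo (PySem.List.enumerate ft) base'
          = (ft.map (fun t => if t ≤ 0 then base' else min t base')).sum := by
        rw [consumedTo]
        conv_rhs => rw [← hsnd, List.map_map]
        rfl
      have hsplitq := List.filter_append_perm (fun t : Int => decide (t ≤ 0)) ft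
      have hnot : ft.filter (fun t => !decide (t ≤ 0)) = ft.filter (fun t => decide (0 < t)) :=
        List.filter_congr (fun x _ => by rw [Bool.eq_iff_iff]; simp)
      rw [hnot] at hsplitq
      have h1 : (ft.map (fun t => if t ≤ 0 then base' else min t base')).sum
          = (((ft.filter (fun t => decide (t ≤ 0))) ++ (ft.filter (fun t => decide (0 < t)))).map
              (fun t => if t ≤ 0 then base' else min t base')).sum :=
        ((hsplitq.map (fun t => if t ≤ 0 then base' else min t base')).sum_eq).symm
      have h2 : (ft.filter (fun t => decide (t ≤ 0))).map (fun t => if t ≤ 0 then base' else min t base')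
          = (ft.filter (fun t => decide (t ≤ 0))).map (fun _ => base') :=
        List.map_congr_left (fun x hx => by
          have := (List.mem_filter.1 hx).2
          simp at this
          simp [this])
      have h3 : (ft.filter (fun t => decide (0 < t))).map (fun t => if t ≤ 0 then base' else min t base')
          = (ft.filter (fun t => decide (0 < t))).map (fun t => min t base') :=
        List.map_congr_left (fun x hx => by
          have := (List.mem_filter.1 hx).2
          simp at this
          rw [if_neg (by omega)])
      have h4 : ((ft.filter (fun t => decide (0 < t))).map (fun t => min t base')).sum
          = ((pre' ++ s').map (fun t => min t base')).sum :=
        ((hperm2.map (fun t => min t base')).sum_eq).symm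
      have h5 : pre'.map (fun t => min t base') = pre'.map (fun t => t) :=
        List.map_congr_left (fun x hx => by have := hpre2 x hx; simp; omega)
      have h6 : s'.map (fun t => min t base') = s'.map (fun _ => base') :=
        List.map_congr_left (fun x hx => by have := hs2 x hx; simp; omega)
      rw [hmapval, h1, List.map_append, List.sum_append, h2, h3, h4, List.map_append, List.sum_append,
        h5, h6, PySem.List.sum_map_const_int, PySem.List.sum_map_const_int]
      simp
      ring
    have hcons0 : 0 ≤ consumedTo (PySem.List.enumerate ft) base' := by
      apply List.sum_nonneg
      intro y hy
      simp only [List.mem_map] at hy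
      obtain ⟨x, hx, rfl⟩ := hy
      split_ifs <;> omega
    have hksplit : k = consumedTo (PySem.List.enumerate ft) base' + k' := by
      rw [← hcons]
      linarith [hsum2]
    have hphase := phase base'.toNat (PySem.List.enumerate ft)
    rw [Int.toNat_of_nonneg hb2] at hphase
    rw [← hremdef] at hphase
    have hkt : k.toNat = (consumedTo (PySem.List.enumerate ft) base').toNat + k'.toNat := by
      omega
    have hrun1 : runQ k.toNat (PySem.List.enumerate ft)
        = runQ k'.toNat (rem.map (fun x => (x.1, x.2 - base'))) := by
      rw [hkt, runQ_add, hphase]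
    -- every surviving food is never-finished or survives past the partial block
    have hbound : ∀ y ∈ rem.map (fun x => (x.1, x.2 - base')),
        y.2 ≤ 0 ∨ ((k'.toNat / rem.length : Nat) : Int) + 1 ≤ y.2 := by
      intro y hy
      simp only [List.mem_map] at hy
      obtain ⟨x, hx, rfl⟩ := hy
      have hxq := (List.mem_filter.1 hx).1
      have hxp := (List.mem_filter.1 hx).2
      simp only [decide_eq_true_eq] at hxp
      by_cases hxneg : x.2 ≤ 0
      · left; simp only; omega
      · have hxpos : 0 < x.2 := by omega
        have hxgt : base' < x.2 := by
          rcases hxp with h | h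
          · omega
          · exact h
        have hxft : x.2 ∈ ft := by
          rw [← hsnd]
          exact List.mem_map.2 ⟨x, hxq, rfl⟩
        have hxmem : x.2 ∈ (ft.filter (fun t => decide (0 < t))).filter (fun t => decide (base' < t)) :=
          List.mem_filter.2 ⟨List.mem_filter.2 ⟨hxft, by simpa using hxpos⟩, by simpa using hxgt⟩
        have hxs : x.2 ∈ s' := hpermS.mem_iff.2 hxmem
        rcases hs'eq : s' with _ | ⟨t0, rest0⟩
        · rw [hs'eq] at hxs; simp at hxs
        · right
          rw [hs'eq] at hxs hpw2
          have ht0le : t0 ≤ x.2 := by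
            rcases List.mem_cons.1 hxs with h | h
            · rw [h]
            · exact (List.pairwise_cons.1 hpw2).1 x.2 h
          have hexit := hexit2 t0 rest0 hs'eq
          have hmint : ((ft.filter (fun t => decide (t ≤ 0))).length : Int) + ((rest0.length : Int) + 1) = (rem.length : Int) := by
            rw [hm, hs'eq]
            simp only [List.length_cons]
            push_cast
            ring
          have hkrlt : k'.toNat < (t0 - base').toNat * rem.length := by
            have ht0b : base' < t0 := hs2 t0 (by rw [hs'eq]; simp)
            have h1 : (k' : Int) < ((t0 - base').toNat : Int) * (rem.length : Int) := by
              rw [Int.toNat_of_nonneg (by omega), ← hmint]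
              calc k' < (t0 - base') * (((ft.filter (fun t => decide (t ≤ 0))).length : Int) + (rest0.length : Int) + 1) := hexit
                _ = (t0 - base') * (((ft.filter (fun t => decide (t ≤ 0))).length : Int) + ((rest0.length : Int) + 1)) := by ring
            have h2 : (k' : Int) < (((t0 - base').toNat * rem.length : Nat) : Int) := by
              push_cast
              exact h1
            omega
          have hd_lt : k'.toNat / rem.length < (t0 - base').toNat :=
            (Nat.div_lt_iff_lt_mul hmpos).2 (by rw [Nat.mul_comm] at hkrlt ⊢; exact hkrlt)
          simp only
          omega
    have hrounds := runQ_rounds (k'.toNat / rem.length) (rem.map (fun x => (x.1, x.2 - base'))) hbound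
    have hlenmap : (rem.map (fun x => (x.1, x.2 - base'))).length = rem.length := by simp
    rw [hlenmap] at hrounds
    have hrun2 : runQ k'.toNat (rem.map (fun x => (x.1, x.2 - base')))
        = runQ (k'.toNat % rem.length) (rem.map (fun x => (x.1, x.2 - base' - ((k'.toNat / rem.length : Nat) : Int)))) := by
      conv_lhs => rw [show k'.toNat = (k'.toNat / rem.length) * rem.length + k'.toNat % rem.length by
        rw [Nat.mul_comm]; exact (Nat.div_add_mod _ _).symm]
      rw [runQ_add, hrounds, List.map_map]
      rfl
    have hr_lt : k'.toNat % rem.length < rem.length := Nat.mod_lt _ hmpos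
    have hr_lt' : k'.toNat % rem.length < (rem.map (fun x => (x.1, x.2 - base' - ((k'.toNat / rem.length : Nat) : Int)))).length := by
      simpa using hr_lt
    have hhead := runQ_head _ _ hr_lt'
    rw [hrun1, hrun2, hhead]
    simp only [List.getElem_map, Option.map_some, Option.getD_some]
    -- the B side
    have hlenrot : (((rem.map Prod.fst).length : Nat) : Int) = ((rem.length : Nat) : Int) := by simp
    rw [hlenrot, PySem.Int.mod_eq_emod_of_pos (by exact_mod_cast hmpos)]
    have hmodv : k' % ((rem.length : Nat) : Int) = ((k'.toNat % rem.length : Nat) : Int) := by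
      rw [show k' = ((k'.toNat : Nat) : Int) by omega]
      push_cast
      rfl
    rw [hmodv]
    show _ = (PySem.List.pyGet? (rem.map Prod.fst) ((k'.toNat % rem.length : Nat) : Int)).getD 0 + 1
    rw [PySem.List.pyGet?_natCast, List.getElem?_eq_getElem (by simpa using hr_lt)]
    simp only [Option.getD_some, List.getElem_map]

-- ===== VERDICT (by name: the statement is the Claim_ definition above) =====
theorem solution_spec : Claim_equal_solution := by
  unfold Claim_equal_solution
  intro ft k hdom hpre
  unfold Spec_solution
  exact equal_body ft k hpre.1 hpre.2
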